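-- pv_equiv track=rewrite | github.com/XAI-and-GBTMs/XAI-and-GBTMs | verification/verify_ltr.py | get_group_sizes
-- ===== SOURCE A (Python) =====
-- def get_group_sizes(qids):
--     """Convert qids to group sizes for XGBoost"""
--     groups = []
--     current_qid = qids[0]
--     count = 0
--
--     for qid in qids:
--         if qid == current_qid:
--             count += 1
--         else:
--             groups.append(count)
--             current_qid = qid
--             count = 1
--     groups.append(count)
--
--     return groups
-- ===== SOURCE B (Python) =====
-- def get_group_sizes(qids):
--     """Convert qids to group sizes for XGBoost"""
--     n = len(qids)
--     starts = [i for i in range(n) if i == 0 or qids[i] != qids[i - 1]]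
--     return [b - a for a, b in zip(starts, starts[1:] + [n])]
-- ===== Notes on version B (the rewrite author's own statement) =====
-- stated objective: alternative
-- what changed: Replaced A's single-pass current_qid/count state machine by a staged boundary-index computation: collect the indices where a new run starts (qids[i] != qids[i-1]), then return the differences of consecutive boundaries.
-- outside the precondition, e.g. on get_group_sizes([]): A raises IndexError, B returns []
import Mathlib
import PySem

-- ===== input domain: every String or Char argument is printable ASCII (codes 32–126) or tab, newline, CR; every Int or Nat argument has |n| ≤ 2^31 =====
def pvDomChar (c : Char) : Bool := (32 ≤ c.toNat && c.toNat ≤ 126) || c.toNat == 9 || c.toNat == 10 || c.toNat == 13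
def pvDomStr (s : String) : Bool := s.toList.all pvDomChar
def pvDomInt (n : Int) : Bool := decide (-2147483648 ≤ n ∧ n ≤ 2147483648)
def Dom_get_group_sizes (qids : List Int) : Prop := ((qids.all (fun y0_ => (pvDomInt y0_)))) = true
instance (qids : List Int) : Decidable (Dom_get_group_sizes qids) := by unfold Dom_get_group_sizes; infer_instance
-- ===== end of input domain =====

-- B replaces A's current_qid/count state machine by a staged boundary-index computation:
-- collect the run-start indices, then take differences of consecutive boundaries.

-- ===== PORT A =====
-- A's loop: state (groups, current_qid, count); the first-element access raises IndexError on [] (excluded by Pre_).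
def pvStepA (st : List Int × Int × Int) (q : Int) : List Int × Int × Int :=
  if q = st.2.1 then (st.1, st.2.1, st.2.2 + 1) else (st.1 ++ [st.2.2], q, 1)

def get_group_sizes (qids : List Int) : List Int :=
  match qids with
  | [] => []   -- unreachable under Pre_: Python raises IndexError here
  | q0 :: _ =>
    let st := qids.foldl pvStepA ([], q0, 0)
    st.1 ++ [st.2.2]

-- ===== PORT B =====
-- starts = [i for i in range(n) if i == 0 or qids[i] != qids[i-1]]
-- return [b - a for a, b in zip(starts, starts[1:] + [n])]
def get_group_sizes_alt (qids : List Int) : List Int :=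
  let n : Int := qids.length
  let starts : List Int := (PySem.List.pyRange 0 n 1).filter
    (fun i => i == 0 || !(PySem.List.pyGet? qids i == PySem.List.pyGet? qids (i - 1)))
  (starts.zip (starts.drop 1 ++ [n])).map (fun p => p.2 - p.1)

-- ===== PRECONDITION & SPEC =====
-- On the empty list Python A raises IndexError at its first-element access; excluded.
def Pre_get_group_sizes (qids : List Int) : Prop := qids ≠ []
instance (qids : List Int) : Decidable (Pre_get_group_sizes qids) := by unfold Pre_get_group_sizes; infer_instance
def pvWitness_get_group_sizes : List Int := [1, 1, 2]
def Spec_get_group_sizes (qids : List Int) (out : List Int) : Prop := out = get_group_sizes_alt qids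
instance (qids : List Int) (out : List Int) : Decidable (Spec_get_group_sizes qids out) := by unfold Spec_get_group_sizes; infer_instance

-- ===== CLAIM =====
def Claim_equal_get_group_sizes : Prop := ∀ (qids : List Int), Dom_get_group_sizes qids → Pre_get_group_sizes qids → Spec_get_group_sizes qids (get_group_sizes qids)

-- ===== LEMMAS AND PROOFS =====

-- Canonical run-length list (proof helper only; neither port).
def pvRuns : List Int → List Int
  | [] => []
  | q :: t =>
    ((t.takeWhile (· = q)).length + 1 : Int) :: pvRuns (t.dropWhile (· = q))
termination_by l => l.length
decreasing_by
  exact Nat.lt_succ_of_le (List.length_dropWhile_le _ _)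

lemma pvRuns_nil : pvRuns [] = [] := by rw [pvRuns]
lemma pvRuns_cons (q : Int) (t : List Int) :
    pvRuns (q :: t)
      = ((t.takeWhile (· = q)).length + 1 : Int) :: pvRuns (t.dropWhile (· = q)) := by
  rw [pvRuns]

-- ---- A equals pvRuns ----
def consRuns (c : Int) (cnt : Int) : List Int → List Int
  | [] => [cnt]
  | q :: t => if q = c then consRuns c (cnt + 1) t else cnt :: consRuns q 1 t

lemma foldl_consRuns (t : List Int) : ∀ (g : List Int) (c cnt : Int),
    (t.foldl pvStepA (g, c, cnt)).1 ++ [(t.foldl pvStepA (g, c, cnt)).2.2]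
      = g ++ consRuns c cnt t := by
  induction t with
  | nil => intro g c cnt; simp [consRuns]
  | cons q t ih =>
    intro g c cnt
    by_cases h : q = c
    · simp [pvStepA, consRuns, h, ih]
    · simp [pvStepA, consRuns, h, ih]

lemma consRuns_runs (t : List Int) : ∀ (c cnt : Int),
    consRuns c cnt t = (cnt + (t.takeWhile (· = c)).length) :: pvRuns (t.dropWhile (· = c)) := by
  induction t with
  | nil => intro c cnt; simp [consRuns, pvRuns_nil]
  | cons q t ih =>
    intro c cnt
    by_cases h : q = c
    · simp only [consRuns, if_pos h, ih, List.takeWhile_cons, List.dropWhile_cons]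
      simp [h]
      ring_nf
    · simp only [consRuns, if_neg h, List.takeWhile_cons, List.dropWhile_cons]
      simp only [decide_eq_true_eq, h, if_false, List.length_nil]
      rw [ih, pvRuns_cons]
      simp
      ring_nf

lemma a_eq_pvRuns (q : Int) (t : List Int) :
    get_group_sizes (q :: t) = pvRuns (q :: t) := by
  have h0 : get_group_sizes (q :: t)
      = ((q :: t).foldl pvStepA ([], q, 0)).1 ++ [((q :: t).foldl pvStepA ([], q, 0)).2.2] := rfl
  rw [h0, List.foldl_cons]
  have h1 : pvStepA ([], q, 0) q = ([], q, 1) := by simp [pvStepA]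
  rw [h1, foldl_consRuns t [] q 1, consRuns_runs, pvRuns_cons]
  simp
  ring_nf

-- ---- B equals pvRuns ----
-- Nat-indexed boundary predicate and boundary list.
def pvP (l : List Int) (i : Nat) : Bool := i == 0 || !(l[i]? == l[i - 1]?)
def pvS (l : List Int) : List Nat := (List.range l.length).filter (pvP l)
-- differences of consecutive boundaries, closed by the total length n
def pvDiffs (s : List Nat) (n : Nat) : List Int :=
  (s.zip (s.drop 1 ++ [n])).map (fun p => (p.2 : Int) - (p.1 : Int))

-- Bridge: B's Int-level computation is pvDiffs (pvS l) l.length.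
lemma b_eq_nat (l : List Int) :
    get_group_sizes_alt l = pvDiffs (pvS l) l.length := by
  simp only [get_group_sizes_alt]
  unfold pvDiffs pvS
  have hr : PySem.List.pyRange 0 (l.length : Int) 1
      = (List.range l.length).map (fun k : Nat => ((k : Int))) := by
    rw [PySem.List.pyRange_one]
    simp
  rw [hr, List.filter_map]
  have hp : ∀ k ∈ List.range l.length,
      ((fun i : Int => i == 0 || !(PySem.List.pyGet? l i == PySem.List.pyGet? l (i - 1)))
        ∘ (fun k : Nat => (k : Int))) k = pvP l k := by
    intro k _
    cases k with
    | zero => simp [pvP]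
    | succ j =>
      simp only [Function.comp, pvP]
      have h1 : ((j + 1 : Nat) : Int) - 1 = (j : Int) := by push_cast; ring
      rw [h1, PySem.List.pyGet?_natCast, PySem.List.pyGet?_natCast]
      simp
      intro h
      exact absurd h (by omega)
  rw [List.filter_congr hp]
  set s := (List.range l.length).filter (pvP l) with hs
  have hb : (s.map (fun k : Nat => ((k : Int)))).drop 1 ++ [((l.length : Nat) : Int)]
      = (s.drop 1 ++ [l.length]).map (fun k : Nat => ((k : Int))) := by
    simp
  rw [hb, List.zip_map, List.map_map]
  apply List.map_congr_left
  intro p _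
  simp

-- head of dropWhile fails the predicate
lemma dropWhile_head_ne (q : Int) : ∀ (t : List Int), (t.dropWhile (· = q))[0]? ≠ some q := by
  intro t
  induction t with
  | nil => simp
  | cons x t ih =>
    by_cases h : x = q
    · simpa [h] using ih
    · simp [h]

-- the run decomposition of pvS
lemma pvS_run (q : Int) (t : List Int) :
    pvS (q :: t)
      = 0 :: (pvS (t.dropWhile (· = q))).map (((t.takeWhile (· = q)).length + 1) + ·) := by
  set k := (t.takeWhile (· = q)).length with hk
  set r := t.dropWhile (· = q) with hrdef
  set F := q :: t.takeWhile (· = q) with hF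
  have hFlen : F.length = k + 1 := by
    rw [hF]; simp only [List.length_cons]; omega
  have hsplit : q :: t = F ++ r := by
    rw [hF, hrdef]
    simp [List.takeWhile_append_dropWhile]
  have hFq : ∀ x ∈ F, x = q := by
    intro x hx
    rcases List.mem_cons.mp hx with h | h
    · exact h
    · simpa using List.mem_takeWhile_imp h
  have hidxF : ∀ i, i ≤ k → (q :: t)[i]? = some q := by
    intro i hi
    rw [hsplit, List.getElem?_append_left (by omega)]
    have hil : i < F.length := by omega
    rw [List.getElem?_eq_getElem hil]
    exact congrArg some (hFq _ (List.getElem_mem hil))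
  have hidxR : ∀ j, (q :: t)[(k + 1) + j]? = r[j]? := by
    intro j
    rw [hsplit, List.getElem?_append_right (by omega)]
    congr 1
    omega
  have hlen : (q :: t).length = (k + 1) + r.length := by
    rw [hsplit, List.length_append, hFlen]
  unfold pvS
  rw [hlen, List.range_add, List.filter_append]
  have hleft : (List.range (k + 1)).filter (pvP (q :: t)) = [0] := by
    rw [List.range_succ_eq_map, List.filter_cons]
    have h0 : pvP (q :: t) 0 = true := by simp [pvP]
    rw [if_pos h0, List.filter_map]
    have hnil : (List.range k).filter (pvP (q :: t) ∘ Nat.succ) = [] := by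
      rw [List.filter_eq_nil_iff]
      intro j hj
      have hjk : j < k := List.mem_range.mp hj
      simp only [Function.comp, pvP]
      have h1 : (q :: t)[j + 1]? = some q := hidxF _ (by omega)
      have h2 : (q :: t)[j]? = some q := hidxF j (by omega)
      simp [Nat.succ_eq_add_one, h1, h2]
    rw [hnil]
    simp
  have hright : ∀ j ∈ List.range r.length, pvP (q :: t) ((k + 1) + j) = pvP r j := by
    intro j hj
    have hjr : j < r.length := List.mem_range.mp hj
    cases j with
    | zero =>
      have hne : r[0]? ≠ some q := by rw [hrdef]; exact dropWhile_head_ne q t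
      obtain ⟨v, hv⟩ : ∃ v, r[0]? = some v := by
        rw [List.getElem?_eq_getElem hjr]; exact ⟨_, rfl⟩
      have hvq : v ≠ q := fun h => hne (h ▸ hv)
      simp only [pvP]
      have h1 : (q :: t)[k + 1 + 0]? = some v := by rw [hidxR 0, hv]
      have he : k + 1 + 0 - 1 = k := by omega
      have h2 : (q :: t)[k + 1 + 0 - 1]? = some q := by rw [he]; exact hidxF k (le_refl k)
      have h2' : (q :: t)[k]? = some q := hidxF k (le_refl k)
      simp [h1, h2', hv, hvq]
    | succ i =>
      simp only [pvP]
      have h1 : (q :: t)[k + 1 + (i + 1)]? = r[i + 1]? := hidxR (i + 1)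
      have he : k + 1 + (i + 1) - 1 = k + 1 + i := by omega
      have h2 : (q :: t)[k + 1 + (i + 1) - 1]? = r[i]? := by rw [he]; exact hidxR i
      have h2' : (q :: t)[k + 1 + i]? = r[i]? := hidxR i
      simp [h1, h2']
  rw [hleft, List.filter_map, List.filter_congr (by
    intro j hj
    simpa using hright j hj)]
  simp

-- shifting all boundaries and the closing length leaves the differences unchanged
lemma pvDiffs_shift (s : List Nat) (k m : Nat) :
    pvDiffs (s.map (k + ·)) (k + m) = pvDiffs s m := by
  unfold pvDiffs
  have hb : (s.map (k + ·)).drop 1 ++ [k + m] = (s.drop 1 ++ [m]).map (k + ·) := by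
    simp
  rw [hb, List.zip_map, List.map_map]
  apply List.map_congr_left
  intro p _
  simp only [Function.comp, Prod.map]
  push_cast
  ring

-- first-element unfoldings of pvDiffs
lemma pvDiffs_zero_nil (n : Nat) : pvDiffs [0] n = [(n : Int)] := by
  simp [pvDiffs]

lemma pvDiffs_zero_cons (x : Nat) (s : List Nat) (n : Nat) :
    pvDiffs (0 :: x :: s) n = (x : Int) :: pvDiffs (x :: s) n := by
  simp [pvDiffs]

lemma pvS_head (r : List Int) (x : Nat) (s2 : List Nat) (h : pvS r = x :: s2) : x = 0 := by
  cases r with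
  | nil => simp [pvS] at h
  | cons a b =>
    rw [pvS_run] at h
    exact ((List.cons.injEq _ _ _ _).mp h).1.symm

lemma b_runs (l : List Int) : pvDiffs (pvS l) l.length = pvRuns l := by
  induction l using pvRuns.induct with
  | case1 => simp [pvS, pvDiffs, pvRuns_nil]
  | case2 q t ih =>
    rw [pvS_run, pvRuns_cons, ← ih]
    set k := (t.takeWhile (· = q)).length with hk
    set r := t.dropWhile (· = q) with hrdef
    have hlen : (q :: t).length = (k + 1) + r.length := by
      have h := congrArg List.length (List.takeWhile_append_dropWhile (p := fun x => decide (x = q)) (l := t))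
      rw [List.length_append] at h
      simp only [List.length_cons]
      rw [hk, hrdef]
      omega
    rw [hlen]
    cases hcase : pvS r with
    | nil =>
      have hlen0 : r.length = 0 := by
        by_contra hne
        have hmem : 0 ∈ pvS r := by
          unfold pvS
          rw [List.mem_filter]
          exact ⟨List.mem_range.mpr (Nat.pos_of_ne_zero hne), by simp [pvP]⟩
        rw [hcase] at hmem
        simp at hmem
      simp only [List.map_nil]
      rw [hlen0]
      rw [pvDiffs_zero_nil]
      simp [pvDiffs]
    | cons x s2 =>
      have hx0 : x = 0 := pvS_head _ x s2 hcase
      subst hx0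
      simp only [List.map_cons, Nat.add_zero]
      rw [pvDiffs_zero_cons]
      have hm : ((k + 1 : Nat) : Nat) :: s2.map ((k + 1) + ·) = ((0 :: s2).map ((k + 1) + ·)) := by
        simp
      rw [hm, pvDiffs_shift]
      congr 1

-- ===== VERDICT =====
theorem get_group_sizes_spec : Claim_equal_get_group_sizes := by
  intro qids _ hpre
  unfold Spec_get_group_sizes
  match qids with
  | [] => exact absurd rfl hpre
  | q :: t => rw [a_eq_pvRuns, b_eq_nat, b_runs]
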